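-- pv_equiv track=rewrite | github.com/bencz/go-plus | project_manager.py | _remove_exception_definitions
-- ===== SOURCE A (Python) =====
-- def _remove_exception_definitions(go_code: str) -> str:
--     """Remove duplicate exception definitions"""
--     lines = go_code.split('\n')
--     filtered_lines = []
--     skip_block = False
--     in_import_block = False
--
--     i = 0
--     while i < len(lines):
--         line = lines[i]
--
--         # Detect start of exception block
--         if '// Exception types' in line:
--             skip_block = True
--             # Skip until finding a blank line after the block
--             while i < len(lines) and not (lines[i].strip() == '' and i + 1 < len(lines) and
--                                          (lines[i + 1].startswith('type ') or lines[i + 1].startswith('func ') or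
--                                           lines[i + 1].strip() == '')):
--                 i += 1
--             skip_block = False
--             i += 1
--             continue
--
--         # Detect import block
--         if line.strip() == 'import (':
--             in_import_block = True
--             # Collect all imports
--             import_lines = [line]
--             i += 1
--             while i < len(lines) and lines[i].strip() != ')':
--                 import_line = lines[i]
--                 # Remove fmt and errors imports if only for exceptions
--                 if import_line.strip() not in ['"fmt"', '"errors"']:
--                     import_lines.append(import_line)
--                 i += 1
--
--             # Add closing parenthesis
--             if i < len(lines):
--                 import_lines.append(lines[i])  # )
--
--             # Only add block if it contains more than fmt/errors
--             if len(import_lines) > 2:  # More than import( and )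
--                 filtered_lines.extend(import_lines)
--
--             in_import_block = False
--             i += 1
--             continue
--
--         if not skip_block:
--             filtered_lines.append(line)
--
--         i += 1
--
--     return '\n'.join(filtered_lines)
-- ===== SOURCE B (Python) =====
-- def _special(line):
--     return '// Exception types' in line or line.strip() == 'import ('
--
--
-- def _go(lines):
--     """Recursively process the line list segment by segment, building the result front-to-back."""
--     if not lines:
--         return []
--     head = lines[0]
--     if '// Exception types' in head:
--         # drop everything up to (and including) the blank line that ends the block
--         j = next((k for k in range(len(lines))
--                   if lines[k].strip() == '' and k + 1 < len(lines) and
--                      (lines[k + 1].startswith('type ') or lines[k + 1].startswith('func ') or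
--                       lines[k + 1].strip() == '')), len(lines))
--         return _go(lines[j + 1:])
--     if head.strip() == 'import (':
--         j = next((k for k in range(1, len(lines)) if lines[k].strip() == ')'), len(lines))
--         block = ([head]
--                  + [x for x in lines[1:j] if x.strip() not in ('"fmt"', '"errors"')]
--                  + lines[j:j + 1])
--         return (block if len(block) > 2 else []) + _go(lines[j + 1:])
--     # plain run: keep everything up to the next special line
--     j = next((k for k in range(1, len(lines)) if _special(lines[k])), len(lines))
--     return lines[:j] + _go(lines[j:])
--
--
-- def _remove_exception_definitions(go_code: str) -> str:
--     """Remove duplicate exception definitions (recursive segment decomposition)."""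
--     return '\n'.join(_go(go_code.split('\n')))
-- ===== Notes on version B (the rewrite author's own statement) =====
-- stated objective: alternative
-- what changed: B replaces A's index-driven outer while loop (with nested element-by-element skip/collect loops and a filtered_lines accumulator) by a recursion on list suffixes that consumes one whole segment per step -- finding each segment boundary with next() over an index generator, filtering the import body with a comprehension -- and builds the result front-to-back by concatenation.
import Mathlib
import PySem

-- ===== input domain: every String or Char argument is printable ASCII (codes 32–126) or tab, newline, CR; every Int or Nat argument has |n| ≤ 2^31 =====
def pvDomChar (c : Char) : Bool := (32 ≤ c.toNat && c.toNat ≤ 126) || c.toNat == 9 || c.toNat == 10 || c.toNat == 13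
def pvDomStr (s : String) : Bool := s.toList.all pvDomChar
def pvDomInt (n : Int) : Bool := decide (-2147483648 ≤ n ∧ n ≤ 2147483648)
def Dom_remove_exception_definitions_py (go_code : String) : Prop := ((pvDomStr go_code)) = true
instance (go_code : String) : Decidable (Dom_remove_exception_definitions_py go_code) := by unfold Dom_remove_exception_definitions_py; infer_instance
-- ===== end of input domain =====

-- B replaces A's index-driven while loop (with nested skip/collect loops and an accumulator) by a
-- recursion on list suffixes that processes one whole segment per step and builds the output
-- front-to-back (objective: alternative).

-- ===== PORT A =====
-- A's inner exception-skipping while loop: returns the index where the loop stops.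
def pvA_skipEx (lines : List String) (i : Nat) : Nat :=
  if h : i < lines.length then
    if (PySem.Str.strip lines[i] == "" && decide (i + 1 < lines.length) &&
        (PySem.Str.startswith (lines.getD (i + 1) "") "type " ||
         PySem.Str.startswith (lines.getD (i + 1) "") "func " ||
         PySem.Str.strip (lines.getD (i + 1) "") == "")) then i
    else pvA_skipEx lines (i + 1)
  else i
termination_by lines.length - i
decreasing_by exact Nat.sub_succ_lt_self lines.length i h

-- A's inner import-collecting while loop: returns (import_lines, stop index).
def pvA_collect (lines : List String) (i : Nat) (import_lines : List String) : List String × Nat :=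
  if h : i < lines.length then
    if PySem.Str.strip lines[i] == ")" then (import_lines, i)
    else pvA_collect lines (i + 1)
      (if ["\"fmt\"", "\"errors\""].contains (PySem.Str.strip lines[i]) then import_lines
       else import_lines ++ [lines[i]])
  else (import_lines, i)
termination_by lines.length - i
decreasing_by exact Nat.sub_succ_lt_self lines.length i h

-- termination facts for A's outer loop (cited in decreasing_by)

theorem pvA_skipEx_ge (lines : List String) (i : Nat) : i ≤ pvA_skipEx lines i := by
  by_cases hi : i < lines.length
  · rw [pvA_skipEx, dif_pos hi]
    split
    · exact Nat.le_refl i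
    · exact Nat.le_trans (Nat.le_succ i) (pvA_skipEx_ge lines (i + 1))
  · have h0 : pvA_skipEx lines i = i := by rw [pvA_skipEx, dif_neg hi]
    exact Nat.le_of_eq h0.symm
termination_by lines.length - i
decreasing_by exact Nat.sub_succ_lt_self lines.length i hi

theorem pvA_collect_snd_ge (lines : List String) (i : Nat) (acc : List String) :
    i ≤ (pvA_collect lines i acc).2 := by
  by_cases hi : i < lines.length
  · rw [pvA_collect, dif_pos hi]
    split
    · exact Nat.le_refl i
    · exact Nat.le_trans (Nat.le_succ i) (pvA_collect_snd_ge lines (i + 1) _)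
  · rw [pvA_collect, dif_neg hi]
termination_by lines.length - i
decreasing_by exact Nat.sub_succ_lt_self lines.length i hi

-- A's outer while loop with the filtered_lines accumulator.
def pvA_loop (lines : List String) (i : Nat) (filtered : List String) : List String :=
  if h : i < lines.length then
    if PySem.Str.isIn "// Exception types" lines[i] then
      pvA_loop lines (pvA_skipEx lines i + 1) filtered
    else if PySem.Str.strip lines[i] == "import (" then
      let r := pvA_collect lines (i + 1) [lines[i]]
      let imps := if r.2 < lines.length then r.1 ++ [lines.getD r.2 ""] else r.1
      pvA_loop lines (r.2 + 1) (if imps.length > 2 then filtered ++ imps else filtered)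
    else
      pvA_loop lines (i + 1) (filtered ++ [lines[i]])
  else filtered
termination_by lines.length - i
decreasing_by all_goals
  first
  | exact Nat.sub_succ_lt_self lines.length i h
  | exact Nat.sub_lt_sub_left h (Nat.lt_succ_of_le (pvA_skipEx_ge lines i))
  | exact Nat.sub_lt_sub_left h (Nat.lt_succ_of_le (Nat.le_trans (Nat.le_succ i) (pvA_collect_snd_ge lines (i + 1) [lines[i]])))

def remove_exception_definitions_py (go_code : String) : String :=
  PySem.Str.join "\n" (pvA_loop ((PySem.Str.split? go_code "\n").getD []) 0 [])

-- ===== PORT B =====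
-- Source B's _special
def pvSpecial (line : String) : Bool :=
  PySem.Str.isIn "// Exception types" line || PySem.Str.strip line == "import ("

-- the blank-line-with-lookahead terminator of an exception block, on a suffix
def pvB_stop (a : String) (t : List String) : Bool :=
  PySem.Str.strip a == "" &&
    (match t with
     | b :: _ => PySem.Str.startswith b "type " || PySem.Str.startswith b "func " ||
                 PySem.Str.strip b == ""
     | [] => false)

-- Source B: 'next(k for k ... if <terminator>)' — the suffix starting at that k ([] if none)
def pvB_endEx : List String → List String
  | [] => []
  | a :: t => if pvB_stop a t then a :: t else pvB_endEx t

-- Source B: 'lines[:j], lines[j:]' around 'next(k ... if p lines[k])' — break at the first p-line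
def pvB_break (p : String → Bool) : List String → List String × List String
  | [] => ([], [])
  | a :: t =>
    if p a then ([], a :: t)
    else (a :: (pvB_break p t).1, (pvB_break p t).2)

-- length facts cited by pvB_go's decreasing_by
theorem pvB_endEx_len_le (l : List String) : (pvB_endEx l).length ≤ l.length := by
  induction l with
  | nil => simp [pvB_endEx]
  | cons a t ih =>
    rw [pvB_endEx]
    split
    · exact Nat.le_refl _
    · exact Nat.le_trans ih (Nat.le_succ _)

theorem pvB_break_len_le (p : String → Bool) (l : List String) :
    (pvB_break p l).2.length ≤ l.length := by
  induction l with
  | nil => simp [pvB_break]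
  | cons a t ih =>
    rw [pvB_break]
    split
    · exact Nat.le_refl _
    · exact Nat.le_trans ih (Nat.le_succ _)

-- Source B's _go: recursion on suffixes, one whole segment per step, output built front-to-back
def pvB_go (l : List String) : List String :=
  match l with
  | [] => []
  | a :: t =>
    if PySem.Str.isIn "// Exception types" a then
      pvB_go ((pvB_endEx (a :: t)).drop 1)
    else if PySem.Str.strip a == "import (" then
      let r := pvB_break (fun x => PySem.Str.strip x == ")") t
      let block := a :: (r.1.filter fun x =>
          !(["\"fmt\"", "\"errors\""].contains (PySem.Str.strip x))) ++ r.2.take 1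
      (if block.length > 2 then block else []) ++ pvB_go (r.2.drop 1)
    else
      a :: (pvB_break pvSpecial t).1 ++ pvB_go (pvB_break pvSpecial t).2
termination_by l.length
decreasing_by
  · have h1 := pvB_endEx_len_le (a :: t)
    simp only [List.length_drop, List.length_cons] at *
    omega
  · have h1 := pvB_break_len_le (fun x => PySem.Str.strip x == ")") t
    simp only [List.length_drop, List.length_cons] at *
    omega
  · have h1 := pvB_break_len_le pvSpecial t
    simp only [List.length_cons] at *
    omega

def remove_exception_definitions_py_alt (go_code : String) : String :=
  PySem.Str.join "\n" (pvB_go ((PySem.Str.split? go_code "\n").getD []))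

-- ===== PRECONDITION & SPEC =====
def Spec_remove_exception_definitions_py (go_code : String) (out : String) : Prop := out = remove_exception_definitions_py_alt go_code
instance (go_code : String) (out : String) : Decidable (Spec_remove_exception_definitions_py go_code out) := by unfold Spec_remove_exception_definitions_py; infer_instance

-- ===== CLAIM (what is proved, stated in full; the proofs are below) =====
def Claim_equal_remove_exception_definitions_py : Prop := ∀ (go_code : String), Dom_remove_exception_definitions_py go_code → Spec_remove_exception_definitions_py go_code (remove_exception_definitions_py go_code)

-- ===== LEMMAS AND PROOFS =====

-- A's outer-loop accumulator distributes
theorem pvA_loop_acc_aux (n : Nat) : ∀ (lines : List String) (i : Nat) (acc : List String),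
    lines.length - i ≤ n → pvA_loop lines i acc = acc ++ pvA_loop lines i [] := by
  induction n with
  | zero =>
    intro lines i acc hn
    conv_lhs => rw [pvA_loop]
    conv_rhs => rw [pvA_loop]
    rw [dif_neg (by omega), dif_neg (by omega)]
    simp
  | succ n IH =>
    intro lines i acc hn
    by_cases hi : i < lines.length
    · by_cases hexc : (PySem.Str.isIn "// Exception types" lines[i]) = true
      · conv_lhs => rw [pvA_loop]
        conv_rhs => rw [pvA_loop]
        rw [dif_pos hi, dif_pos hi, if_pos hexc, if_pos hexc]
        have hge := pvA_skipEx_ge lines i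
        exact IH lines _ acc (by omega)
      · by_cases himp : (PySem.Str.strip lines[i] == "import (") = true
        · conv_lhs => rw [pvA_loop]
          conv_rhs => rw [pvA_loop]
          rw [dif_pos hi, dif_pos hi, if_neg hexc, if_neg hexc, if_pos himp, if_pos himp]
          have hge := pvA_collect_snd_ge lines (i + 1) [lines[i]]
          conv_lhs => rw [IH lines ((pvA_collect lines (i + 1) [lines[i]]).2 + 1) _ (by omega)]
          conv_rhs => rw [IH lines ((pvA_collect lines (i + 1) [lines[i]]).2 + 1) _ (by omega)]
          split <;> rename_i h1 <;> split <;> rename_i h2 <;> simp [h1]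
        · conv_lhs => rw [pvA_loop]
          conv_rhs => rw [pvA_loop]
          rw [dif_pos hi, dif_pos hi, if_neg hexc, if_neg hexc, if_neg himp, if_neg himp]
          conv_lhs => rw [IH lines (i + 1) _ (by omega)]
          conv_rhs => rw [IH lines (i + 1) _ (by omega)]
          simp
    · conv_lhs => rw [pvA_loop]
      conv_rhs => rw [pvA_loop]
      rw [dif_neg hi, dif_neg hi]
      simp

theorem pvA_loop_acc (lines : List String) (i : Nat) (acc : List String) :
    pvA_loop lines i acc = acc ++ pvA_loop lines i [] :=
  pvA_loop_acc_aux (lines.length - i) lines i acc (Nat.le_refl _)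

-- A's collect accumulator distributes
theorem pvA_collect_acc (lines : List String) (i : Nat) (acc : List String) :
    pvA_collect lines i acc =
      (acc ++ (pvA_collect lines i []).1, (pvA_collect lines i []).2) := by
  by_cases hi : i < lines.length
  · by_cases hpar : (PySem.Str.strip lines[i] == ")") = true
    · conv_lhs => rw [pvA_collect]
      conv_rhs => rw [pvA_collect]
      rw [dif_pos hi, dif_pos hi, if_pos hpar, if_pos hpar]
      simp
    · conv_lhs => rw [pvA_collect]
      conv_rhs => rw [pvA_collect]
      rw [dif_pos hi, dif_pos hi, if_neg hpar, if_neg hpar]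
      by_cases hfe : (["\"fmt\"", "\"errors\""].contains (PySem.Str.strip lines[i])) = true
      · rw [if_pos hfe, if_pos hfe, pvA_collect_acc lines (i + 1) acc]
      · rw [if_neg hfe, if_neg hfe, pvA_collect_acc lines (i + 1) (acc ++ [lines[i]])]
        simp only [List.nil_append]
        rw [pvA_collect_acc lines (i + 1) [lines[i]]]
        simp
  · conv_lhs => rw [pvA_collect]
    conv_rhs => rw [pvA_collect]
    rw [dif_neg hi, dif_neg hi]
    simp
termination_by lines.length - i
decreasing_by all_goals exact Nat.sub_succ_lt_self lines.length i hi

-- B's exception terminator search equals A's skip loop (suffix view)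
theorem pvB_endEx_drop (lines : List String) (i : Nat) :
    pvB_endEx (lines.drop i) = lines.drop (pvA_skipEx lines i) := by
  by_cases hi : i < lines.length
  · rw [List.drop_eq_getElem_cons hi, pvA_skipEx, dif_pos hi, pvB_endEx]
    have hcond : pvB_stop lines[i] (lines.drop (i + 1)) =
        (PySem.Str.strip lines[i] == "" && decide (i + 1 < lines.length) &&
         (PySem.Str.startswith (lines.getD (i + 1) "") "type " ||
          PySem.Str.startswith (lines.getD (i + 1) "") "func " ||
          PySem.Str.strip (lines.getD (i + 1) "") == "")) := by
      by_cases h1 : i + 1 < lines.length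
      · rw [List.drop_eq_getElem_cons h1]
        simp [pvB_stop, h1]
      · rw [List.drop_eq_nil_of_le (by omega)]
        simp [pvB_stop, h1]
    rw [hcond]
    split
    · rw [← List.drop_eq_getElem_cons hi]
    · exact pvB_endEx_drop lines (i + 1)
  · rw [List.drop_eq_nil_of_le (by omega), pvA_skipEx, dif_neg hi,
        List.drop_eq_nil_of_le (by omega), pvB_endEx]
termination_by lines.length - i
decreasing_by exact Nat.sub_succ_lt_self lines.length i hi

-- B's break-at-')' equals A's collect loop (prefix filtered, stop as suffix)
theorem pvB_break_drop (lines : List String) (i : Nat) :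
    ((pvB_break (fun x => PySem.Str.strip x == ")") (lines.drop i)).1.filter fun x =>
        !(["\"fmt\"", "\"errors\""].contains (PySem.Str.strip x))) =
      (pvA_collect lines i []).1 ∧
    (pvB_break (fun x => PySem.Str.strip x == ")") (lines.drop i)).2 =
      lines.drop (pvA_collect lines i []).2 := by
  by_cases hi : i < lines.length
  · by_cases hpar : (PySem.Str.strip lines[i] == ")") = true
    · rw [List.drop_eq_getElem_cons hi, pvB_break, pvA_collect, dif_pos hi,
          if_pos hpar, if_pos hpar]
      exact ⟨rfl, (List.drop_eq_getElem_cons hi).symm⟩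
    · have IH := pvB_break_drop lines (i + 1)
      rw [List.drop_eq_getElem_cons hi, pvB_break, pvA_collect, dif_pos hi,
          if_neg hpar, if_neg hpar, pvA_collect_acc lines (i + 1)]
      refine ⟨?_, IH.2⟩
      rw [List.filter_cons, ← IH.1]
      by_cases h1 : PySem.Str.strip lines[i] = "\"fmt\"" <;>
        by_cases h2 : PySem.Str.strip lines[i] = "\"errors\"" <;>
          simp [h1, h2]
  · rw [List.drop_eq_nil_of_le (by omega), pvB_break, pvA_collect, dif_neg hi,
        List.drop_eq_nil_of_le (by omega)]
    exact ⟨rfl, rfl⟩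
termination_by lines.length - i
decreasing_by exact Nat.sub_succ_lt_self lines.length i hi

-- a plain (non-special) head is just passed through by B's recursion
theorem pvB_go_plain (a : String) (t : List String) (h : pvSpecial a = false) :
    pvB_go (a :: t) = a :: pvB_go t := by
  have hexc : (PySem.Str.isIn "// Exception types" a) = false := by
    simp only [pvSpecial, Bool.or_eq_false_iff] at h; exact h.1
  have himp : (PySem.Str.strip a == "import (") = false := by
    simp only [pvSpecial, Bool.or_eq_false_iff] at h; exact h.2
  rw [pvB_go]
  simp only [hexc, himp, Bool.false_eq_true, if_false]
  cases t with
  | nil => simp [pvB_break, pvB_go]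
  | cons b t' =>
    by_cases hb : pvSpecial b = true
    · rw [pvB_break, if_pos hb]
      simp
    · have hb' : pvSpecial b = false := by simpa using hb
      have hexcb : (PySem.Str.isIn "// Exception types" b) = false := by
        simp only [pvSpecial, Bool.or_eq_false_iff] at hb'; exact hb'.1
      have himpb : (PySem.Str.strip b == "import (") = false := by
        simp only [pvSpecial, Bool.or_eq_false_iff] at hb'; exact hb'.2
      conv_rhs => rw [pvB_go]
      simp only [hexcb, himpb, Bool.false_eq_true, if_false]
      rw [pvB_break, if_neg (by simp [hb'])]
      simp

-- MAIN: A's loop from index i equals B's recursion on the suffix from i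
theorem pv_main (lines : List String) (i : Nat) :
    pvA_loop lines i [] = pvB_go (lines.drop i) := by
  by_cases hi : i < lines.length
  · by_cases hexc : (PySem.Str.isIn "// Exception types" lines[i]) = true
    · -- exception segment
      have hge := pvA_skipEx_ge lines i
      rw [pvA_loop, dif_pos hi, if_pos hexc, List.drop_eq_getElem_cons hi, pvB_go]
      simp only [hexc, if_true]
      rw [← List.drop_eq_getElem_cons hi, pvB_endEx_drop lines i, List.drop_drop,
          pv_main lines (pvA_skipEx lines i + 1)]
    · by_cases himp : (PySem.Str.strip lines[i] == "import (") = true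
      · -- import segment
        have hcol := pvA_collect_snd_ge lines (i + 1) []
        rw [pvA_loop, dif_pos hi, if_neg hexc, if_pos himp, List.drop_eq_getElem_cons hi, pvB_go]
        simp only [hexc, Bool.false_eq_true, if_false, himp, if_true]
        have hbr := pvB_break_drop lines (i + 1)
        rw [pvA_loop_acc, pv_main lines ((pvA_collect lines (i + 1) [lines[i]]).2 + 1)]
        rw [pvA_collect_acc lines (i + 1)]
        simp only [hbr.1, hbr.2, List.drop_drop]
        set C := pvA_collect lines (i + 1) [] with hC
        have htk : (lines.drop C.2).take 1 =
            (if C.2 < lines.length then [lines.getD C.2 ""] else []) := by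
          by_cases h2 : C.2 < lines.length
          · rw [if_pos h2, List.getD_eq_getElem lines "" h2, List.drop_eq_getElem_cons h2]
            rfl
          · rw [if_neg h2, List.drop_eq_nil_of_le (by omega)]
            rfl
        rw [htk]
        by_cases h2 : C.2 < lines.length <;>
          simp [h2, Nat.add_comm]
      · -- plain line
        have hsp : pvSpecial lines[i] = false := by
          simp only [pvSpecial, Bool.or_eq_false_iff]
          exact ⟨by simpa using hexc, by simpa using himp⟩
        rw [pvA_loop, dif_pos hi, if_neg hexc, if_neg himp, List.drop_eq_getElem_cons hi,
            pvB_go_plain _ _ hsp, pvA_loop_acc, pv_main lines (i + 1)]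
        simp
  · rw [pvA_loop, dif_neg hi, List.drop_eq_nil_of_le (by omega)]
    simp [pvB_go]
termination_by lines.length - i
decreasing_by all_goals
  first
  | exact Nat.sub_succ_lt_self lines.length i hi
  | (have := pvA_skipEx_ge lines i; omega)
  | (have := pvA_collect_snd_ge lines (i + 1) [lines[i]]; omega)

-- ===== VERDICT (by name: the statement is the Claim_ definition above) =====
theorem remove_exception_definitions_py_spec : Claim_equal_remove_exception_definitions_py := by
  intro go_code _
  unfold Spec_remove_exception_definitions_py
  unfold remove_exception_definitions_py remove_exception_definitions_py_alt
  rw [pv_main _ 0, List.drop_zero]
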